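-- pv_equiv track=rewrite | github.com/CAgAG/Arithmetic_PY | lanqiao/2016-java_/剪邮票.py | check
-- ===== SOURCE A (Python) =====
-- def checkIndex(x, y):
--     if x >= 0 and x <= 2 and y >= 0 and y <= 3:
--         return True
--     return False
--
-- def dfs(x, y, Map: list):
--     Map[x][y] = 0
--     if checkIndex(x + 1, y) and Map[x + 1][y] == 1:
--         dfs(x + 1, y, Map)
--     if checkIndex(x - 1, y) and Map[x - 1][y] == 1:
--         dfs(x - 1, y, Map)
--     if checkIndex(x, y + 1) and Map[x][y + 1] == 1:
--         dfs(x, y + 1, Map)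
--     if checkIndex(x, y - 1) and Map[x][y - 1] == 1:
--         dfs(x, y - 1, Map)
--
-- def check(arr):
--     # 构建arr 0-1 map
--     count = 1
--     Map = []
--     for i in range(3):
--         tp = []
--         for j in range(4):
--             if count in arr:
--                 tp.append(1)
--             else:
--                 tp.append(0)
--             count += 1
--         Map.append(tp)
--
--     count = 0
--     for i in range(3):
--         for j in range(4):
--             if Map[i][j] == 1:
--                 dfs(i, j, Map)
--                 count += 1
--     return count == 1
-- ===== SOURCE B (Python) =====
-- def check(arr):
--     # Union-find over the 12 grid cells instead of recursive flood fill.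
--     occ = [c for c in range(12) if c + 1 in arr]
--     occ_set = set(occ)
--     parent = list(range(12))
--
--     def find(i):
--         while parent[i] != i:
--             i = parent[i]
--         return i
--
--     def union(i, j):
--         ri, rj = find(i), find(j)
--         if ri != rj:
--             parent[ri] = rj
--
--     for c in occ:
--         if c % 4 < 3 and c + 1 in occ_set:
--             union(c, c + 1)
--         if c // 4 < 2 and c + 4 in occ_set:
--             union(c, c + 4)
--     roots = {find(c) for c in occ}
--     return len(roots) == 1
-- ===== Notes on version B (the rewrite author's own statement) =====
-- stated objective: alternative
-- what changed: Replaced the recursive flood-fill (dfs marking a mutable 3x4 map and counting restarts) by union-find over the 12 cells: occupied cells are unioned with their right/down occupied neighbours and the answer is whether the occupied cells have exactly one distinct root.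
import Mathlib
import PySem

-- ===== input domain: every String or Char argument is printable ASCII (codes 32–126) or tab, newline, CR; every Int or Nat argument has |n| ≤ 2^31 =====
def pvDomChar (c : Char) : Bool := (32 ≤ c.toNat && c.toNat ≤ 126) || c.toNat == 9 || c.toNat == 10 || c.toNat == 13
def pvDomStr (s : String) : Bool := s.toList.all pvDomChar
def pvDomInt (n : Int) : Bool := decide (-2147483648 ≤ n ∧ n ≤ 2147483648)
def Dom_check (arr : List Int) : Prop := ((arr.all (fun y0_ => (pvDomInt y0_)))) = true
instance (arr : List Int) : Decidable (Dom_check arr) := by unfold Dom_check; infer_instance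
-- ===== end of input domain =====

-- B replaces A's recursive flood-fill component count by union-find over the 12 grid cells (objective: alternative algorithm; return-value equivalence — A mutates no argument).


-- ===== PORT A =====
def checkIndexP (x y : Int) : Bool :=
  if x ≥ 0 && x ≤ 2 && y ≥ 0 && y ≤ 3 then true else false

-- Map[x][y]; only used after checkIndexP guarantees 0 ≤ x,y, so toNat is exact
def getCell (M : List (List Int)) (x y : Int) : Int :=
  (M.getD x.toNat []).getD y.toNat 0

def setCell (M : List (List Int)) (x y : Int) (v : Int) : List (List Int) :=
  M.modify x.toNat (fun row => row.set y.toNat v)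

-- Python's dfs mutates Map; ported as Map-in/Map-out.  Each call zeroes a 1-cell and
-- only recurses into 1-cells, so recursion depth ≤ 12: fuel 13 is exact.
def dfsP : Nat → Int → Int → List (List Int) → List (List Int)
  | 0, _, _, M => M
  | fuel+1, x, y, M =>
    let M := setCell M x y 0
    let M := if checkIndexP (x+1) y && (getCell M (x+1) y == 1) then dfsP fuel (x+1) y M else M
    let M := if checkIndexP (x-1) y && (getCell M (x-1) y == 1) then dfsP fuel (x-1) y M else M
    let M := if checkIndexP x (y+1) && (getCell M x (y+1) == 1) then dfsP fuel x (y+1) M else M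
    let M := if checkIndexP x (y-1) && (getCell M x (y-1) == 1) then dfsP fuel x (y-1) M else M
    M

def buildMapP (arr : List Int) : List (List Int) :=
  ((PySem.List.pyRange 0 3 1).foldl (fun (st : Int × List (List Int)) _ =>
      let inner := (PySem.List.pyRange 0 4 1).foldl (fun (st2 : Int × List Int) _ =>
          (st2.1 + 1, st2.2 ++ [if st2.1 ∈ arr then (1:Int) else 0])) (st.1, [])
      (inner.1, st.2 ++ [inner.2])) ((1:Int), [])).2

def countPhaseP (Map : List (List Int)) : Bool :=
  ((PySem.List.pyRange 0 3 1).foldl (fun (st : Int × List (List Int)) i =>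
      (PySem.List.pyRange 0 4 1).foldl (fun (st2 : Int × List (List Int)) j =>
          if getCell st2.2 i j == 1 then (st2.1 + 1, dfsP 13 i j st2.2) else st2) st)
    ((0:Int), Map)).1 == 1

def check (arr : List Int) : Bool :=
  countPhaseP (buildMapP arr)

-- ===== PORT B =====
-- while parent[i] != i: i = parent[i]  — chains in this forest have length < 12, fuel 12 is exact
def ufFind (fuel : Nat) (parent : List Nat) (i : Nat) : Nat :=
  match fuel with
  | 0 => i
  | f+1 =>
    let p := parent.getD i i
    if p == i then i else ufFind f parent p

def ufUnion (parent : List Nat) (i j : Nat) : List Nat :=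
  let ri := ufFind 12 parent i
  let rj := ufFind 12 parent j
  if ri != rj then parent.set ri rj else parent

def ufRun (occ : List Nat) : Bool :=
  let parent := occ.foldl (fun p c =>
      let p := if c % 4 < 3 && occ.contains (c+1) then ufUnion p c (c+1) else p
      if c / 4 < 2 && occ.contains (c+4) then ufUnion p c (c+4) else p)
    (List.range 12)
  (PySem.Set.ofList (occ.map (ufFind 12 parent))).length == 1

def check_alt (arr : List Int) : Bool :=
  ufRun ((List.range 12).filter (fun c => decide (((c:Int)+1) ∈ arr)))

-- ===== PRECONDITION & SPEC =====
def Spec_check (arr : List Int) (out : Bool) : Prop := out = check_alt arr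
instance (arr : List Int) (out : Bool) : Decidable (Spec_check arr out) := by unfold Spec_check; infer_instance

-- ===== CLAIM (what is proved, stated in full; the proofs are below) =====
def Claim_equal_check : Prop := ∀ (arr : List Int), Dom_check arr → Spec_check arr (check arr)

-- ===== LEMMAS AND PROOFS =====
-- Both programs depend on arr only through the 12 membership bits 1..12 ∈ arr.
def mapOfBools (b1 b2 b3 b4 b5 b6 b7 b8 b9 b10 b11 b12 : Bool) : List (List Int) :=
  [[cond b1 1 0, cond b2 1 0, cond b3 1 0, cond b4 1 0],
   [cond b5 1 0, cond b6 1 0, cond b7 1 0, cond b8 1 0],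
   [cond b9 1 0, cond b10 1 0, cond b11 1 0, cond b12 1 0]]

def occOfBools (b1 b2 b3 b4 b5 b6 b7 b8 b9 b10 b11 b12 : Bool) : List Nat :=
  (List.range 12).filter (fun c => [b1,b2,b3,b4,b5,b6,b7,b8,b9,b10,b11,b12].getD c false)

set_option maxRecDepth 100000 in
set_option maxHeartbeats 4000000 in
theorem core_equiv : ∀ (b1 b2 b3 b4 b5 b6 b7 b8 b9 b10 b11 b12 : Bool),
    countPhaseP (mapOfBools b1 b2 b3 b4 b5 b6 b7 b8 b9 b10 b11 b12) =
    ufRun (occOfBools b1 b2 b3 b4 b5 b6 b7 b8 b9 b10 b11 b12) := by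
  decide

theorem buildMap_eq (arr : List Int) :
    buildMapP arr = mapOfBools (decide ((1:Int) ∈ arr)) (decide ((2:Int) ∈ arr))
      (decide ((3:Int) ∈ arr)) (decide ((4:Int) ∈ arr)) (decide ((5:Int) ∈ arr))
      (decide ((6:Int) ∈ arr)) (decide ((7:Int) ∈ arr)) (decide ((8:Int) ∈ arr))
      (decide ((9:Int) ∈ arr)) (decide ((10:Int) ∈ arr)) (decide ((11:Int) ∈ arr))
      (decide ((12:Int) ∈ arr)) := by
  show [[if (1:Int) ∈ arr then (1:Int) else 0, if (2:Int) ∈ arr then (1:Int) else 0,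
         if (3:Int) ∈ arr then (1:Int) else 0, if (4:Int) ∈ arr then (1:Int) else 0],
        [if (5:Int) ∈ arr then (1:Int) else 0, if (6:Int) ∈ arr then (1:Int) else 0,
         if (7:Int) ∈ arr then (1:Int) else 0, if (8:Int) ∈ arr then (1:Int) else 0],
        [if (9:Int) ∈ arr then (1:Int) else 0, if (10:Int) ∈ arr then (1:Int) else 0,
         if (11:Int) ∈ arr then (1:Int) else 0, if (12:Int) ∈ arr then (1:Int) else 0]] = _
  simp [mapOfBools, Bool.cond_decide]

theorem occ_eq (arr : List Int) :
    check_alt arr =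
    ufRun (occOfBools (decide ((1:Int) ∈ arr)) (decide ((2:Int) ∈ arr))
      (decide ((3:Int) ∈ arr)) (decide ((4:Int) ∈ arr)) (decide ((5:Int) ∈ arr))
      (decide ((6:Int) ∈ arr)) (decide ((7:Int) ∈ arr)) (decide ((8:Int) ∈ arr))
      (decide ((9:Int) ∈ arr)) (decide ((10:Int) ∈ arr)) (decide ((11:Int) ∈ arr))
      (decide ((12:Int) ∈ arr))) := by
  rfl

-- ===== VERDICT (by name: the statement is the Claim_ definition above) =====
theorem check_spec : Claim_equal_check := by
  intro arr _
  show check arr = check_alt arr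
  rw [check, occ_eq, buildMap_eq]
  exact core_equiv _ _ _ _ _ _ _ _ _ _ _ _
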